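-- pv_equiv track=rewrite | github.com/kushalkoirala-maker/final-project | app/services/validator.py | _acl_denied_without_permit
-- ===== SOURCE A (Python) =====
-- def _acl_denied_without_permit(commands: list[str]) -> bool:
--     saw_prior_permit = False
--     for command in commands:
--         normalized = " ".join((command or "").strip().lower().split())
--         if not normalized:
--             continue
--         if "permit ip any any" in normalized:
--             saw_prior_permit = True
--         if "deny ip any any" in normalized and not saw_prior_permit:
--             return True
--     return False
-- ===== SOURCE B (Python) =====
-- def _acl_denied_without_permit(commands: list[str]) -> bool:
--     norm = [" ".join((c or "").strip().lower().split()) for c in commands]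
--
--     def first_index(sub):
--         for i, line in enumerate(norm):
--             if sub in line:
--                 return i
--         return len(norm)
--
--     return first_index("deny ip any any") < first_index("permit ip any any")
-- ===== Notes on version B (the rewrite author's own statement) =====
-- stated objective: simpler
-- what changed: Replaces the flagged single loop with two first-match index scans over the pre-normalized lines: the result is first-deny-index < first-permit-index, which also makes the permit-wins-on-same-line rule fall out of the strict inequality.
import Mathlib
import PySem

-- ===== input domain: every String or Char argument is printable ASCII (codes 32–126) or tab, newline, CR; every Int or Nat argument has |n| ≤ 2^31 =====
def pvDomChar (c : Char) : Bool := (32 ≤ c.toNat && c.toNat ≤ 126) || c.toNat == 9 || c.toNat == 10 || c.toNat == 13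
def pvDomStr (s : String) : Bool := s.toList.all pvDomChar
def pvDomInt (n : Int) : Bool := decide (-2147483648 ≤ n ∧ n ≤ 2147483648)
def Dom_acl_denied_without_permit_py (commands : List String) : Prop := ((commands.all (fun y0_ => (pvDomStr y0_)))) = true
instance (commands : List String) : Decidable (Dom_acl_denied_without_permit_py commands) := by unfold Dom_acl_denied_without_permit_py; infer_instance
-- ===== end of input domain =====

-- B replaces A's flagged single loop by two first-match index scans over the normalized lines
-- (result = first-deny-index < first-permit-index): a simpler, accumulator-free decomposition.


-- ===== PORT A =====
-- normalized = " ".join((command or "").strip().lower().split())  ('command or ""' = command for a str)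
def aclNormA (command : String) : String :=
  PySem.Str.join " " (PySem.Str.split₀ (PySem.Str.lower (PySem.Str.strip command)))

-- the for-loop with the saw_prior_permit accumulator and the early return
def aclLoopA : List String → Bool → Bool
  | [], _ => false
  | command :: rest, saw =>
      let normalized := aclNormA command
      if normalized = "" then aclLoopA rest saw
      else
        let saw' := saw || PySem.Str.isIn "permit ip any any" normalized
        if PySem.Str.isIn "deny ip any any" normalized && !saw' then true
        else aclLoopA rest saw'

def acl_denied_without_permit_py (commands : List String) : Bool :=
  aclLoopA commands false

-- ===== PORT B =====
-- norm = [" ".join((c or "").strip().lower().split()) for c in commands]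
def aclNormB (c : String) : String :=
  PySem.Str.join " " (PySem.Str.split₀ (PySem.Str.lower (PySem.Str.strip c)))

-- first_index(sub): index of the first normalized line containing sub, len(norm) if none
def aclFirstIndex (sub : String) : List String → Nat
  | [] => 0
  | line :: rest => if PySem.Str.isIn sub line then 0 else aclFirstIndex sub rest + 1

def acl_denied_without_permit_py_alt (commands : List String) : Bool :=
  let norm := commands.map aclNormB
  decide (aclFirstIndex "deny ip any any" norm < aclFirstIndex "permit ip any any" norm)

-- ===== PRECONDITION & SPEC =====
def Spec_acl_denied_without_permit_py (commands : List String) (out : Bool) : Prop := out = acl_denied_without_permit_py_alt commands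
instance (commands : List String) (out : Bool) : Decidable (Spec_acl_denied_without_permit_py commands out) := by unfold Spec_acl_denied_without_permit_py; infer_instance

-- ===== CLAIM (what is proved, stated in full; the proofs are below) =====
def Claim_equal_acl_denied_without_permit_py : Prop := ∀ (commands : List String), Dom_acl_denied_without_permit_py commands → Spec_acl_denied_without_permit_py commands (acl_denied_without_permit_py commands)

-- ===== LEMMAS AND PROOFS =====

-- one unfolding step of A's loop (rfl; avoids simp's costly equation generation)
theorem aclLoopA_cons (c : String) (rest : List String) (saw : Bool) :
    aclLoopA (c :: rest) saw =
      (if aclNormA c = "" then aclLoopA rest saw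
       else if PySem.Str.isIn "deny ip any any" (aclNormA c) &&
               !(saw || PySem.Str.isIn "permit ip any any" (aclNormA c)) then true
       else aclLoopA rest (saw || PySem.Str.isIn "permit ip any any" (aclNormA c))) := rfl

-- once the permit flag is set A can never return True
theorem aclLoopA_true (cs : List String) : aclLoopA cs true = false := by
  induction cs with
  | nil => rfl
  | cons c rest ih => rw [aclLoopA_cons]; split <;> simp [ih]

-- one unfolding step of B's index scan (rfl)
theorem aclFirstIndex_cons (sub line : String) (rest : List String) :
    aclFirstIndex sub (line :: rest) =
      (if PySem.Str.isIn sub line then 0 else aclFirstIndex sub rest + 1) := rfl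

-- main invariant: A's loop from the unset flag computes B's index comparison
theorem aclLoopA_eq (cs : List String) :
    aclLoopA cs false =
      decide (aclFirstIndex "deny ip any any" (cs.map aclNormB) <
              aclFirstIndex "permit ip any any" (cs.map aclNormB)) := by
  induction cs with
  | nil => rfl
  | cons c rest ih =>
      have hnorm : aclNormA c = aclNormB c := rfl
      rw [aclLoopA_cons, hnorm, List.map_cons, aclFirstIndex_cons, aclFirstIndex_cons]
      by_cases hE : aclNormB c = ""
      · have hp : PySem.Str.isIn "permit ip any any" (aclNormB c) = false := by
          rw [hE]; decide
        have hd : PySem.Str.isIn "deny ip any any" (aclNormB c) = false := by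
          rw [hE]; decide
        rw [if_pos hE, hp, hd, if_neg Bool.false_ne_true, if_neg Bool.false_ne_true, ih]
        simp only [decide_eq_decide]
        omega
      · rw [if_neg hE]
        cases hp : PySem.Str.isIn "permit ip any any" (aclNormB c) <;>
          cases hd : PySem.Str.isIn "deny ip any any" (aclNormB c) <;>
            simp [aclLoopA_true, ih]

-- ===== VERDICT (by name: the statement is the Claim_ definition above) =====
theorem acl_denied_without_permit_py_spec : Claim_equal_acl_denied_without_permit_py := by
  intro commands _
  unfold Spec_acl_denied_without_permit_py acl_denied_without_permit_py acl_denied_without_permit_py_alt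
  simpa using aclLoopA_eq commands
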